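-- pv_equiv track=rewrite | github.com/NyfyN/SystemyOdporne | src/utils.py | highlight_errors
-- ===== SOURCE A (Python) =====
-- def highlight_errors(message, errors):
--     """
--     Highlights erroneous bits in the message. Erroneous bits are highlighted in red.
--     """
--     highlighted = ""
--     for i, bit in enumerate(message):
--         if i in errors:
--             highlighted += f'<span style="color: red; font-weight: bold;">{bit}</span>'
--         else:
--             highlighted += bit
--     return highlighted
-- ===== SOURCE B (Python) =====
-- def highlight_errors(message, errors):
--     # Inverted traversal: loop over errors once, patching a char list, instead of
--     # testing membership for every character (simpler/faster for long messages).
--     chars = list(message)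
--     for i in errors:
--         if 0 <= i < len(message):
--             chars[i] = f'<span style="color: red; font-weight: bold;">{message[i]}</span>'
--     return ''.join(chars)
-- ===== Notes on version B (the rewrite author's own statement) =====
-- stated objective: faster
-- what changed: B converts the message to a char list and loops over the errors list once, patching the affected positions in place, instead of scanning the errors list for every character; duplicates and out-of-range indices are harmless because the patch is bound-checked and rewrites from the original message.
import Mathlib
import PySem

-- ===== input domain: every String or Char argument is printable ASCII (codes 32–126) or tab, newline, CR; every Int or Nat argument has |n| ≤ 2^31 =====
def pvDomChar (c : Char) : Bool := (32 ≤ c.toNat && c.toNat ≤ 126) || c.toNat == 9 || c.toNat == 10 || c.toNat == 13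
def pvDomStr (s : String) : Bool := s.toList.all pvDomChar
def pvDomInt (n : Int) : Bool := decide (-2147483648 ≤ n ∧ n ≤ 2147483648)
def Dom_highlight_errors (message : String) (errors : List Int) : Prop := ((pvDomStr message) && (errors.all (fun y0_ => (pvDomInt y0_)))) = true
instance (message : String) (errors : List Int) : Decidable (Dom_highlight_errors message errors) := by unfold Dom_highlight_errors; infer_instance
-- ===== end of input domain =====

-- B changes the traversal shape: one bound-checked patching pass over `errors`
-- instead of a membership test per character (objective: faster, O(n+m) vs O(n*m)).

-- the red span around one character, as a char list
def pvWrap (c : Char) : List Char :=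
  "<span style=\"color: red; font-weight: bold;\">".toList ++ [c] ++ "</span>".toList

-- ===== PORT A =====
-- for i, bit in enumerate(message): highlighted += wrapped-or-plain bit
def highlight_errors (message : String) (errors : List Int) : String :=
  String.mk ((PySem.List.enumerate message.toList).foldl
    (fun acc p => if errors.contains p.1 then acc ++ pvWrap p.2 else acc ++ [p.2]) [])

-- ===== PORT B =====
-- chars = list(message); for i in errors: if 0 <= i < len(message): chars[i] = span;
-- return ''.join(chars)   (''.join of char-list chunks = flatten)
def highlight_errors_alt (message : String) (errors : List Int) : String :=
  let cs := message.toList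
  let chars := errors.foldl
    (fun l e =>
      if 0 ≤ e ∧ e < (cs.length : Int) then l.set e.toNat (pvWrap (cs.getD e.toNat ' '))
      else l)
    (cs.map (fun c => [c]))
  String.mk chars.flatten

-- ===== PRECONDITION & SPEC =====
def Spec_highlight_errors (message : String) (errors : List Int) (out : String) : Prop := out = highlight_errors_alt message errors
instance (message : String) (errors : List Int) (out : String) : Decidable (Spec_highlight_errors message errors out) := by unfold Spec_highlight_errors; infer_instance

-- ===== CLAIM (what is proved, stated in full; the proofs are below) =====
def Claim_equal_highlight_errors : Prop := ∀ (message : String) (errors : List Int), Dom_highlight_errors message errors → Spec_highlight_errors message errors (highlight_errors message errors)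

-- ===== LEMMAS AND PROOFS =====

-- the per-position chunk both programs produce
def pvChunk (errors : List Int) (p : Int × Char) : List Char :=
  if errors.contains p.1 then pvWrap p.2 else [p.2]

-- B's patching loop preserves the list length
theorem pv_fold_length (cs : List Char) (errors : List Int) (init : List (List Char)) :
    (errors.foldl
      (fun l e =>
        if 0 ≤ e ∧ e < (cs.length : Int) then l.set e.toNat (pvWrap (cs.getD e.toNat ' '))
        else l) init).length = init.length := by
  induction errors generalizing init with
  | nil => rfl
  | cons e rest ih =>
    simp only [List.foldl_cons]
    rw [ih]
    split <;> simp

-- element-wise description of B's patched list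
theorem pv_fold_get (cs : List Char) (errors : List Int) (init : List (List Char))
    (hlen : init.length = cs.length) (j : Nat) (hj : j < init.length) :
    (errors.foldl
      (fun l e =>
        if 0 ≤ e ∧ e < (cs.length : Int) then l.set e.toNat (pvWrap (cs.getD e.toNat ' '))
        else l) init)[j]'(by rw [pv_fold_length]; exact hj) =
      if errors.contains ((j : Int)) then pvWrap (cs.getD j ' ') else init[j] := by
  induction errors generalizing init with
  | nil => simp
  | cons e rest ih =>
    simp only [List.foldl_cons]
    have hlen' : (if 0 ≤ e ∧ e < (cs.length : Int) then
        init.set e.toNat (pvWrap (cs.getD e.toNat ' ')) else init).length = cs.length := by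
      split <;> simp [hlen]
    have hj' : j < (if 0 ≤ e ∧ e < (cs.length : Int) then
        init.set e.toNat (pvWrap (cs.getD e.toNat ' ')) else init).length := by
      rw [hlen']; omega
    rw [ih _ hlen' hj']
    by_cases hm : (j : Int) ∈ rest
    · simp [hm]
    · by_cases he : e = (j : Int)
      · subst he
        have hg : 0 ≤ ((j : Nat) : Int) ∧ ((j : Nat) : Int) < (cs.length : Int) := by
          refine ⟨Int.natCast_nonneg j, ?_⟩
          exact_mod_cast (by omega : j < cs.length)
        simp [hm, hg, Int.toNat_natCast]
      · have hcons : ¬ ((j : Int) ∈ e :: rest) := by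
          intro h
          rcases List.mem_cons.mp h with h | h
          · exact he h.symm
          · exact hm h
        simp only [List.contains_eq_mem, hm, hcons, decide_false, Bool.false_eq_true,
          if_false]
        split
        · next hg =>
          have hne : e.toNat ≠ j := by omega
          simp [hne]
        · rfl

-- B's patched list equals the chunk list of A, position by position
theorem pv_b_list (cs : List Char) (errors : List Int) :
    (errors.foldl
      (fun l e =>
        if 0 ≤ e ∧ e < (cs.length : Int) then l.set e.toNat (pvWrap (cs.getD e.toNat ' '))
        else l) (cs.map (fun c => [c]))) =
      (PySem.List.enumerate cs).map (pvChunk errors) := by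
  apply List.ext_getElem
  · rw [pv_fold_length]; simp [PySem.List.length_enumerate]
  · intro j h1 h2
    have hj : j < (cs.map (fun c => [c])).length := by
      have := pv_fold_length cs errors (cs.map (fun c => [c])); omega
    rw [pv_fold_get cs errors _ (by simp) j hj]
    have hjc : j < cs.length := by simpa using hj
    have hje : j < (PySem.List.enumerate cs).length := by
      simpa [PySem.List.length_enumerate] using hjc
    have he : (PySem.List.enumerate cs)[j] = ((j : Int), cs[j]) := by
      have := PySem.List.getElem_enumerate (xs := cs) (s := 0) (k := j)
        (h := by simpa [PySem.List.length_enumerate] using hjc)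
      simpa using this
    simp [he, pvChunk, List.getD, List.getElem?_eq_getElem hjc]

-- A's accumulation loop is the flatMap of the chunks
theorem pv_a_fold (errors : List Int) (l : List (Int × Char)) (acc : List Char) :
    l.foldl (fun acc p => if errors.contains p.1 then acc ++ pvWrap p.2 else acc ++ [p.2]) acc =
      acc ++ l.flatMap (pvChunk errors) := by
  have h : (fun (acc : List Char) (p : Int × Char) =>
      if errors.contains p.1 then acc ++ pvWrap p.2 else acc ++ [p.2]) =
      fun acc p => acc ++ pvChunk errors p := by
    funext acc p; simp only [pvChunk]; split <;> rfl
  rw [h, PySem.List.foldl_append_eq_flatMap]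

-- ===== VERDICT (by name: the statement is the Claim_ definition above) =====
theorem highlight_errors_spec : Claim_equal_highlight_errors := by
  intro message errors _
  show _ = _
  unfold highlight_errors highlight_errors_alt
  simp only [pv_a_fold, pv_b_list, List.nil_append, List.flatMap_def]
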